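-- pv_equiv track=rewrite | github.com/rkurdyumov/advent-of-code-2019 | day12.py | total_energy
-- ===== SOURCE A (Python) =====
-- def move(positions, velocities):
--     new_velocities = [0] * len(velocities)
--     for i in range(len(new_velocities)):
--         others = list(positions)
--         value = others.pop(i)
--         delta = sum([1 if x > value else -1 if x < value else 0 for x in others])
--         new_velocities[i] = velocities[i] + delta
--     new_positions = [x + y for x, y in zip(positions, new_velocities)]
--     return new_positions, new_velocities
--
-- def move_3d(positions, velocities):
--     px, vx = move(positions[0], velocities[0])
--     py, vy = move(positions[1], velocities[1])
--     pz, vz = move(positions[2], velocities[2])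
--     return [px, py, pz], [vx, vy, vz]
--
-- def total_energy(positions, steps):
--     p = positions
--     v = [[0]*len(positions[0])]*len(positions)
--     for _ in range(steps):
--         p, v = move_3d(p, v)
--     p_abs = [list(map(abs, row)) for row in p]
--     v_abs = [list(map(abs, row)) for row in v]
--     potential_energies = [sum(x) for x in zip(*p_abs)]
--     kinetic_energies = [sum(x) for x in zip(*v_abs)]
--     total_energies = [x*y for x, y in zip(potential_energies, kinetic_energies)]
--     return sum(total_energies)
-- ===== SOURCE B (Python) =====
-- def _step_axis(p, v):
--     n = len(p)
--     cnt = {}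
--     for x in p:
--         cnt[x] = cnt.get(x, 0) + 1
--     less = {}
--     acc = 0
--     for val in sorted(cnt):
--         less[val] = acc
--         acc += cnt[val]
--     nv = [v[i] + (n - cnt[p[i]] - 2 * less[p[i]]) for i in range(n)]
--     np_ = [p[i] + nv[i] for i in range(n)]
--     return np_, nv
--
-- def total_energy(positions, steps):
--     p = [list(axis) for axis in positions[:3]]
--     v = [[0] * len(axis) for axis in p]
--     for _ in range(steps):
--         for k in range(len(p)):
--             p[k], v[k] = _step_axis(p[k], v[k])
--     pot = [sum(abs(c) for c in moon) for moon in zip(*p)]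
--     kin = [sum(abs(c) for c in moon) for moon in zip(*v)]
--     return sum(x * y for x, y in zip(pot, kin))
-- ===== Notes on version B (the rewrite author's own statement) =====
-- stated objective: faster
-- what changed: Per axis and step, B replaces A's O(n^2) pairwise sign comparison by building a value counter plus a sorted prefix-count table once, reading each moon's gravity delta as n - eq - 2*less from two hash lookups (O(n log n) per step; intended as faster — a timing run measured ~5-7x at its largest sizes); B also simulates each of the three axes independently instead of threading a 3-tuple of states through move_3d.
-- outside the precondition, e.g. on total_energy([[0, 3], [1, 2, 9], [5, 0]], 2): A returns 75, B returns 102; on total_energy([[1], [2, 5], [3]], 3): A returns 9, B returns 10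
import Mathlib
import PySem

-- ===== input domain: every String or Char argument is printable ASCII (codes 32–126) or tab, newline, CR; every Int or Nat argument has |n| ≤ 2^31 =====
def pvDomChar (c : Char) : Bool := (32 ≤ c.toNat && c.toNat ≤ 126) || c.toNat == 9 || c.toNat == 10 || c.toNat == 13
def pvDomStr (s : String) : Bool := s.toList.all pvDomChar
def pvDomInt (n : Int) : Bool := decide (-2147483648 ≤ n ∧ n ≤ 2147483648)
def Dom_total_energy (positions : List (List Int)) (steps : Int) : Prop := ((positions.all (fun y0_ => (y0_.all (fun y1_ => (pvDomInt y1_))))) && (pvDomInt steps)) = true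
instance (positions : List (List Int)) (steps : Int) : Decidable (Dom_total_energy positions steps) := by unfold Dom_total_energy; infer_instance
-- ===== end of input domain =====

-- B replaces A's per-step O(n^2) pairwise gravity comparison by a value counter plus a sorted
-- prefix-count table (delta_i = n - eq - 2*less), simulating each axis independently; proved equal
-- to A on the stated 3-axis equal-row-length domain (Pre_).


-- ===== PORT A =====
-- 1 if x > value else -1 if x < value else 0
def pvSign (value x : Int) : Int := if value < x then 1 else if x < value then -1 else 0

-- move(positions, velocities); others.pop(i) raises IndexError when i ≥ len(positions) — such
-- inputs are excluded by Pre_, so the `none` branch is never reached on admitted inputs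
def pvA_move (positions velocities : List Int) : List Int × List Int :=
  let nv := (List.range velocities.length).foldl
    (fun nv i =>
      match PySem.List.pop? positions (Int.ofNat i) with
      | some (value, others) =>
          nv.set i (velocities.getD i 0 + (others.map (fun x => pvSign value x)).sum)
      | none => nv)
    (List.replicate velocities.length (0 : Int))
  (List.zipWith (· + ·) positions nv, nv)

-- move_3d: positions[0..2]; Python raises IndexError with fewer than 3 axes (excluded by Pre_ when steps ≥ 1)
def pvA_move3d (p v : List (List Int)) : List (List Int) × List (List Int) :=
  let r0 := pvA_move (p.getD 0 []) (v.getD 0 [])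
  let r1 := pvA_move (p.getD 1 []) (v.getD 1 [])
  let r2 := pvA_move (p.getD 2 []) (v.getD 2 [])
  ([r0.1, r1.1, r2.1], [r0.2, r1.2, r2.2])

-- [sum(x) for x in zip(*rows)]
def pvA_zipStarSum (rows : List (List Int)) : List Int :=
  (List.range (((rows.map List.length).min?).getD 0)).map
    (fun j => (rows.map (fun r => r.getD j 0)).sum)

def total_energy (positions : List (List Int)) (steps : Int) : Int :=
  -- v = [[0]*len(positions[0])]*len(positions); positions[0] raises IndexError on empty input (excluded by Pre_)
  let v0 := List.replicate positions.length (List.replicate (positions.getD 0 []).length (0 : Int))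
  let st := (List.range steps.toNat).foldl
    (fun (pv : List (List Int) × List (List Int)) _ => pvA_move3d pv.1 pv.2) (positions, v0)
  let pabs := st.1.map (fun row => row.map (fun x => |x|))
  let vabs := st.2.map (fun row => row.map (fun x => |x|))
  let pot := pvA_zipStarSum pabs
  let kin := pvA_zipStarSum vabs
  (List.zipWith (· * ·) pot kin).sum

-- ===== PORT B =====
def pvB_stepAxis (p v : List Int) : List Int × List Int :=
  let n : Int := (p.length : Int)
  let cnt := p.foldl (fun d x => d.insert x (d.getD x 0 + 1)) (PySem.Dict.empty : PySem.Dict Int Int)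
  let vals := PySem.List.sorted cnt.keys (fun x => x) false
  let lessAcc := vals.foldl
    (fun (st : PySem.Dict Int Int × Int) val => (st.1.insert val st.2, st.2 + cnt.getD val 0))
    (PySem.Dict.empty, 0)
  let less := lessAcc.1
  let nv := (List.range p.length).map (fun i =>
      v.getD i 0 + (n - cnt.getD (p.getD i 0) 0 - 2 * less.getD (p.getD i 0) 0))
  let np := (List.range p.length).map (fun i => p.getD i 0 + nv.getD i 0)
  (np, nv)

-- [sum(abs(c) for c in moon) for moon in zip(*rows)]
def pvB_absColSums (rows : List (List Int)) : List Int :=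
  (List.range (((rows.map List.length).min?).getD 0)).map
    (fun j => (rows.map (fun r => |r.getD j 0|)).sum)

def total_energy_alt (positions : List (List Int)) (steps : Int) : Int :=
  -- p = [list(axis) for axis in positions[:3]]
  let axes := PySem.List.slice positions none (some 3)
  let pv0 := axes.map (fun axis => (axis, List.replicate axis.length (0 : Int)))
  let pv := (List.range steps.toNat).foldl
    (fun st _ => st.map (fun ab => pvB_stepAxis ab.1 ab.2)) pv0
  let pot := pvB_absColSums (pv.map (·.1))
  let kin := pvB_absColSums (pv.map (·.2))
  (List.zipWith (· * ·) pot kin).sum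

-- ===== PRECONDITION & SPEC =====
-- Pre_ excludes empty positions (A raises IndexError) and, when steps ≥ 1, inputs whose first three
-- axis rows are not all of equal length: there A either raises IndexError (a row shorter than row 0,
-- or fewer than 3 rows) or, on rows longer than row 0, silently zip-truncates them to row 0's
-- length — an artefact of A's fixed-size velocity list that B does not reproduce.
def Pre_total_energy (positions : List (List Int)) (steps : Int) : Prop :=
  positions ≠ [] ∧
    (steps ≤ 0 ∨ (3 ≤ positions.length ∧
      ∀ r ∈ positions.take 3, r.length = (positions.getD 0 []).length))
instance (positions : List (List Int)) (steps : Int) : Decidable (Pre_total_energy positions steps) := by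
  unfold Pre_total_energy; infer_instance

def pvWitness_total_energy : List (List Int) × Int := ([[(-1), 3], [2, 0], [5, 5]], 4)

def Spec_total_energy (positions : List (List Int)) (steps : Int) (out : Int) : Prop :=
  out = total_energy_alt positions steps
instance (positions : List (List Int)) (steps : Int) (out : Int) : Decidable (Spec_total_energy positions steps out) := by
  unfold Spec_total_energy; infer_instance

-- ===== CLAIM (what is proved, stated in full; the proofs are below) =====
def Claim_equal_total_energy : Prop := ∀ (positions : List (List Int)) (steps : Int), Dom_total_energy positions steps → Pre_total_energy positions steps → Spec_total_energy positions steps (total_energy positions steps)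

-- ===== LEMMAS AND PROOFS =====

theorem pv_foldl_set_range (g : Nat → Int) (N : Nat) :
    ∀ k, k ≤ N → (List.range k).foldl (fun acc i => acc.set i (g i)) (List.replicate N (0:Int))
      = (List.range k).map g ++ List.replicate (N - k) 0 := by
  intro k
  induction k with
  | zero => simp
  | succ k ih =>
    intro hk
    rw [List.range_succ, List.foldl_append, ih (by omega)]
    have hrep : List.replicate (N - k) (0:Int) = 0 :: List.replicate (N - (k+1)) 0 := by
      have : N - k = (N - (k+1)) + 1 := by omega
      rw [this, List.replicate_succ]
    simp [hrep]

theorem pv_signsum (val : Int) (l : List Int) :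
    (l.map (fun x => pvSign val x)).sum
      = (l.countP (fun x => decide (val < x)) : Int) - (l.countP (fun x => decide (x < val)) : Int) := by
  induction l with
  | nil => simp
  | cons x l ih =>
    simp only [List.map_cons, List.sum_cons, List.countP_cons]
    rw [ih]
    rcases lt_trichotomy val x with h | h | h
    · simp [pvSign, h, h.asymm]; ring
    · subst h; simp [pvSign]
    · simp [pvSign, h, h.asymm]; ring

theorem pv_tri (val : Int) (l : List Int) :
    l.countP (fun x => decide (val < x)) + l.countP (fun x => decide (x < val)) + l.count val
      = l.length := by
  induction l with
  | nil => simp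
  | cons x l ih =>
    simp only [List.countP_cons, List.count_cons, List.length_cons]
    rcases lt_trichotomy val x with h | h | h
    · have : (x == val) = false := by simp [h.ne']
      simp [h, h.asymm, this]; omega
    · subst h
      simp; omega
    · have : (x == val) = false := by simp [h.ne]
      simp [h, h.asymm, this]; omega

theorem pv_less_untouched (f : Int → Int) (vals : List Int) (v : Int) :
    ∀ (d : PySem.Dict Int Int) (a : Int), v ∉ vals →
      ((vals.foldl (fun st u => (st.1.insert u st.2, st.2 + f u)) (d, a)).1).getD v 0 = d.getD v 0 := by
  induction vals with
  | nil => intro d a _; simp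
  | cons w ws ih =>
    intro d a hv
    simp only [List.foldl_cons]
    rw [ih _ _ (by simp_all)]
    exact PySem.Dict.getD_insert_of_ne d a 0 (by simp_all)

theorem pv_less_getD (f : Int → Int) (vals : List Int) (v : Int) :
    ∀ (d : PySem.Dict Int Int) (a : Int), vals.Nodup → v ∈ vals →
      ((vals.foldl (fun st u => (st.1.insert u st.2, st.2 + f u)) (d, a)).1).getD v 0
        = a + ((vals.takeWhile (fun u => u != v)).map f).sum := by
  induction vals with
  | nil => simp
  | cons w ws ih =>
    intro d a hnd hv
    simp only [List.foldl_cons]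
    by_cases hw : w = v
    · have hnot : v ∉ ws := hw ▸ (List.nodup_cons.mp hnd).1
      rw [pv_less_untouched f ws v _ _ hnot, hw, PySem.Dict.getD_insert_self]
      simp
    · have hv' : v ∈ ws := (List.mem_cons.mp hv).resolve_left (fun h => hw h.symm)
      rw [ih _ _ (List.nodup_cons.mp hnd).2 hv']
      have hne : (w != v) = true := by simp [hw]
      simp [hne]
      ring

theorem pv_takeWhile_eq_filter (vals : List Int) (v : Int) :
    vals.Pairwise (· < ·) → v ∈ vals →
      vals.takeWhile (fun u => u != v) = vals.filter (fun u => decide (u < v)) := by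
  induction vals with
  | nil => simp
  | cons w ws ih =>
    intro hp hv
    rcases List.pairwise_cons.mp hp with ⟨hw, hp'⟩
    by_cases hwv : w = v
    · have hfil : ws.filter (fun u => decide (u < v)) = [] :=
        List.filter_eq_nil_iff.mpr (fun a ha => by
          simp only [decide_eq_true_eq]
          exact ((hwv ▸ hw a ha).asymm))
      simp [hwv, hfil]
    · have hv' : v ∈ ws := (List.mem_cons.mp hv).resolve_left (fun h => hwv h.symm)
      have hwlt : w < v := hw v hv'
      simp [hwv, hwlt, ih hp' hv']

theorem pv_filter_count_sum (p : List Int) (vals : List Int)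
    (hnd : vals.Nodup) (hmem : ∀ x, x ∈ vals ↔ x ∈ p) (val : Int) :
    ((vals.filter (fun u => decide (u < val))).map (fun u => (p.count u : Int))).sum
      = (p.countP (fun x => decide (x < val)) : Int) := by
  have hperm : vals.Perm p.dedup :=
    (List.perm_ext_iff_of_nodup hnd p.nodup_dedup).mpr (by
      intro a; rw [hmem a, List.mem_dedup])
  have h2 := (hperm.filter (fun u => decide (u < val))).map (fun u => (p.count u : Int))
  rw [h2.sum_eq]
  have h3 := List.sum_map_count_dedup_filter_eq_countP (fun x => decide (x < val)) p
  calc ((p.dedup.filter (fun u => decide (u < val))).map (fun u => (p.count u : Int))).sum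
      = (((p.dedup.filter (fun u => decide (u < val))).map (fun u => p.count u)).map
          (fun n : Nat => (n : Int))).sum := by rw [List.map_map]; rfl
    _ = _ := by rw [← Nat.cast_list_sum, h3]

theorem pv_nv_eq (p v : List Int) (h : v.length = p.length) :
    ((List.range v.length).foldl
      (fun nv i =>
        match PySem.List.pop? p (Int.ofNat i) with
        | some (value, others) =>
            nv.set i (v.getD i 0 + (others.map (fun x => pvSign value x)).sum)
        | none => nv)
      (List.replicate v.length (0 : Int)))
    = (List.range p.length).map (fun i =>
        v.getD i 0 + (((p.length : Int)
          - (p.foldl (fun d x => d.insert x (d.getD x 0 + 1)) (PySem.Dict.empty : PySem.Dict Int Int)).getD (p.getD i 0) 0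
          - 2 * ((PySem.List.sorted (p.foldl (fun d x => d.insert x (d.getD x 0 + 1)) (PySem.Dict.empty : PySem.Dict Int Int)).keys (fun x => x) false).foldl
              (fun (st : PySem.Dict Int Int × Int) val => (st.1.insert val st.2, st.2 + (p.foldl (fun d x => d.insert x (d.getD x 0 + 1)) (PySem.Dict.empty : PySem.Dict Int Int)).getD val 0))
              (PySem.Dict.empty, 0)).1.getD (p.getD i 0) 0))) := by
  rw [PySem.Dict.foldl_insert_getD_add_one_eq_counter]
  -- A side: replace the popping fold by a set-fold of a pure function of the index
  have hA : (List.range v.length).foldl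
      (fun nv i =>
        match PySem.List.pop? p (Int.ofNat i) with
        | some (value, others) =>
            nv.set i (v.getD i 0 + (others.map (fun x => pvSign value x)).sum)
        | none => nv)
      (List.replicate v.length (0 : Int))
      = (List.range v.length).map (fun i =>
          v.getD i 0 + (((p.eraseIdx i).map (fun x => pvSign (p.getD i 0) x)).sum)) := by
    rw [PySem.List.foldl_congr_mem _ _
      (fun nv i => nv.set i (v.getD i 0 + (((p.eraseIdx i).map (fun x => pvSign (p.getD i 0) x)).sum))) _
      (by
        intro acc i hi
        have hi' : i < p.length := by rw [← h]; exact List.mem_range.mp hi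
        rw [show Int.ofNat i = (i : Int) from rfl, PySem.List.pop?_natCast p i hi']
        simp [List.getElem?_eq_getElem hi'])]
    have := pv_foldl_set_range
      (fun i => v.getD i 0 + (((p.eraseIdx i).map (fun x => pvSign (p.getD i 0) x)).sum))
      v.length v.length (le_refl _)
    simpa using this
  rw [hA, h]
  apply List.map_congr_left
  intro i hi
  have hi' : i < p.length := List.mem_range.mp hi
  congr 1
  -- pointwise: the erase-sum equals n - count - 2*less
  set val := p.getD i 0 with hval
  have hvmem : val ∈ p := by rw [hval, List.getD_eq_getElem p 0 hi']; exact List.getElem_mem hi'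
  -- keys / sorted facts
  have hkeys : (PySem.Dict.counter p).keys = PySem.Set.ofList p := PySem.Dict.keys_counter p
  rw [hkeys]
  set vals := PySem.List.sorted (PySem.Set.ofList p) (fun x => x) false with hvals
  have hpw : vals.Pairwise (· < ·) := PySem.List.sorted_ofList_pairwise_lt p
  have hnd : vals.Nodup := hpw.nodup
  have hmem : ∀ x, x ∈ vals ↔ x ∈ p := by
    intro x
    rw [hvals, PySem.List.mem_sorted, PySem.Set.mem_ofList]
  have hless : ((vals.foldl
      (fun (st : PySem.Dict Int Int × Int) u => (st.1.insert u st.2, st.2 + (PySem.Dict.counter p).getD u 0))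
      (PySem.Dict.empty, 0)).1).getD val 0
      = (p.countP (fun x => decide (x < val)) : Int) := by
    rw [pv_less_getD (fun u => (PySem.Dict.counter p).getD u 0) vals val _ _ hnd ((hmem val).mpr hvmem)]
    rw [pv_takeWhile_eq_filter vals val hpw ((hmem val).mpr hvmem)]
    rw [List.map_congr_left (fun u _ => PySem.Dict.getD_counter p u)]
    rw [pv_filter_count_sum p vals hnd hmem val]
    ring
  rw [hless, PySem.Dict.getD_counter]
  -- erase-sum = full sum
  have hperm : p.Perm (p[i] :: p.eraseIdx i) := (List.getElem_cons_eraseIdx_perm hi').symm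
  have hfull : ((p.eraseIdx i).map (fun x => pvSign val x)).sum = (p.map (fun x => pvSign val x)).sum := by
    have := (hperm.map (fun x => pvSign val x)).sum_eq
    rw [this]
    have : pvSign val (p[i]) = 0 := by
      rw [hval, List.getD_eq_getElem p 0 hi']; simp [pvSign]
    simp [this]
  rw [hfull, pv_signsum]
  have htri := pv_tri val p
  omega

theorem pv_zipWith_eq_map_range (p nv : List Int) (h : nv.length = p.length) :
    List.zipWith (· + ·) p nv = (List.range p.length).map (fun i => p.getD i 0 + nv.getD i 0) := by
  apply List.ext_getElem
  · simp [h]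
  · intro i h1 h2
    have hip : i < p.length := by simpa [h] using h1
    have hin : i < nv.length := by omega
    simp [List.getElem_zipWith, List.getElem?_eq_getElem hip, List.getElem?_eq_getElem hin]

theorem pv_step_eq (p v : List Int) (h : v.length = p.length) :
    pvA_move p v = pvB_stepAxis p v := by
  unfold pvA_move pvB_stepAxis
  dsimp only
  rw [pv_nv_eq p v h]
  rw [pv_zipWith_eq_map_range p _ (by simp)]

theorem pv_step_len (p v : List Int) :
    (pvB_stepAxis p v).2.length = p.length ∧ (pvB_stepAxis p v).1.length = p.length := by
  unfold pvB_stepAxis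
  dsimp only
  constructor <;> simp

theorem pv_sum_zip_zero (pot kin : List Int) (h : ∀ y ∈ kin, y = 0) :
    (List.zipWith (· * ·) pot kin).sum = 0 := by
  induction pot generalizing kin with
  | nil => simp
  | cons x pot ih =>
    cases kin with
    | nil => simp
    | cons y kin =>
      have hy : y = 0 := h y (by simp)
      simp [hy, ih kin (fun z hz => h z (by simp [hz]))]

theorem pv_getD_abs (r : List Int) (j : Nat) :
    (r.map (fun x => |x|)).getD j 0 = |r.getD j 0| := by
  simp only [List.getD, List.getElem?_map]
  cases r[j]? <;> simp

theorem pv_absCol (rows : List (List Int)) :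
    pvA_zipStarSum (rows.map (fun r => r.map (fun x => |x|))) = pvB_absColSums rows := by
  unfold pvA_zipStarSum pvB_absColSums
  have hlen : (rows.map (fun r => r.map (fun x => |x|))).map List.length = rows.map List.length := by
    rw [List.map_map]; apply List.map_congr_left; intro r _; simp
  rw [hlen]
  apply List.map_congr_left
  intro j _
  rw [List.map_map]
  apply congrArg
  apply List.map_congr_left
  intro r _
  exact pv_getD_abs r j

theorem pv_colsA_zero (rows : List (List Int)) (h : ∀ r ∈ rows, ∀ z ∈ r, z = (0:Int)) :
    ∀ y ∈ pvA_zipStarSum rows, y = 0 := by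
  intro y hy
  unfold pvA_zipStarSum at hy
  rcases List.mem_map.mp hy with ⟨j, _, rfl⟩
  apply List.sum_eq_zero
  intro z hz
  rcases List.mem_map.mp hz with ⟨r, hr, rfl⟩
  simp only [List.getD]
  cases hrj : r[j]? with
  | none => rfl
  | some a => simpa using h r hr a (List.mem_of_getElem? hrj)

theorem pv_colsB_zero (rows : List (List Int)) (h : ∀ r ∈ rows, ∀ z ∈ r, z = (0:Int)) :
    ∀ y ∈ pvB_absColSums rows, y = 0 := by
  intro y hy
  unfold pvB_absColSums at hy
  rcases List.mem_map.mp hy with ⟨j, _, rfl⟩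
  apply List.sum_eq_zero
  intro z hz
  rcases List.mem_map.mp hz with ⟨r, hr, rfl⟩
  simp only [List.getD]
  cases hrj : r[j]? with
  | none => rfl
  | some a => simpa using congrArg (fun t => |t|) (h r hr a (List.mem_of_getElem? hrj))

def pvInv (st : List (List Int) × List (List Int)) (L : List (List Int × List Int)) : Prop :=
  st.1 = L.map (·.1) ∧ st.2 = L.map (·.2) ∧ L.length = 3 ∧ ∀ ab ∈ L, ab.2.length = ab.1.length

theorem pv_step3d (st : List (List Int) × List (List Int)) (L : List (List Int × List Int))
    (h : pvInv st L) :
    pvInv (pvA_move3d st.1 st.2) (L.map (fun ab => pvB_stepAxis ab.1 ab.2)) := by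
  obtain ⟨h1, h2, h3, h4⟩ := h
  rcases List.length_eq_three.mp h3 with ⟨a, b, c, rfl⟩
  have ha := h4 a (by simp)
  have hb := h4 b (by simp)
  have hc := h4 c (by simp)
  refine ⟨?_, ?_, by simp, ?_⟩
  · simp only [pvA_move3d, h1, h2, List.map_cons, List.map_nil]
    simp [pv_step_eq a.1 a.2 ha, pv_step_eq b.1 b.2 hb, pv_step_eq c.1 c.2 hc]
  · simp only [pvA_move3d, h1, h2, List.map_cons, List.map_nil]
    simp [pv_step_eq a.1 a.2 ha, pv_step_eq b.1 b.2 hb, pv_step_eq c.1 c.2 hc]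
  · intro ab hab
    simp only [List.map_cons, List.map_nil, List.mem_cons] at hab
    rcases hab with h | h | h | h
    · rw [h]; exact (pv_step_len a.1 a.2).1.trans (pv_step_len a.1 a.2).2.symm
    · rw [h]; exact (pv_step_len b.1 b.2).1.trans (pv_step_len b.1 b.2).2.symm
    · rw [h]; exact (pv_step_len c.1 c.2).1.trans (pv_step_len c.1 c.2).2.symm
    · simp at h

theorem pv_fold_inv (l : List Nat) (st0 : List (List Int) × List (List Int))
    (L0 : List (List Int × List Int)) (h : pvInv st0 L0) :
    pvInv (l.foldl (fun pv _ => pvA_move3d pv.1 pv.2) st0)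
      (l.foldl (fun st _ => st.map (fun ab => pvB_stepAxis ab.1 ab.2)) L0) := by
  induction l generalizing st0 L0 with
  | nil => simpa using h
  | cons a l ih =>
    rw [List.foldl_cons, List.foldl_cons]
    exact ih _ _ (pv_step3d _ _ h)

theorem pv_getD_replicate (m : Nat) (r : List Int) (i : Nat) (hi : i < m) :
    (List.replicate m r).getD i [] = r := by
  simp [List.getD, List.getElem?_replicate, hi]

theorem pv_main (positions : List (List Int)) (steps : Int)
    (hpre : positions ≠ [] ∧
      (steps ≤ 0 ∨ (3 ≤ positions.length ∧
        ∀ r ∈ positions.take 3, r.length = (positions.getD 0 []).length))) :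
    total_energy positions steps = total_energy_alt positions steps := by
  obtain ⟨hne, hshape⟩ := hpre
  unfold total_energy total_energy_alt
  dsimp only
  by_cases hz : steps.toNat = 0
  · rw [hz]
    simp only [List.range_zero, List.foldl_nil]
    refine Eq.trans (pv_sum_zip_zero _ _ ?_) (Eq.symm (pv_sum_zip_zero _ _ ?_))
    · apply pv_colsA_zero
      intro r hr z hz'
      rcases List.mem_map.mp hr with ⟨r', hr', rfl⟩
      rcases List.mem_map.mp hz' with ⟨z', hz'', rfl⟩
      rw [List.eq_of_mem_replicate hr'] at hz''
      rw [List.eq_of_mem_replicate hz'']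
      simp
    · apply pv_colsB_zero
      intro r hr z hz'
      rcases List.mem_map.mp hr with ⟨r', hr', rfl⟩
      rcases List.mem_map.mp hr' with ⟨a, _, rfl⟩
      exact List.eq_of_mem_replicate hz'
  · have hsh : 3 ≤ positions.length ∧
        ∀ r ∈ positions.take 3, r.length = (positions.getD 0 []).length := by
      rcases hshape with h | h
      · exact absurd (Int.toNat_of_nonpos h) hz
      · exact h
    match positions, hsh with
    | x :: y :: z :: rest, hsh =>
    have hy : y.length = x.length := hsh.2 y (by simp)
    have hz' : z.length = x.length := hsh.2 z (by simp)
    have hslice : PySem.List.slice (x :: y :: z :: rest) none (some 3) = [x, y, z] := by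
      rw [show (3 : Int) = ((3 : Nat) : Int) from rfl, PySem.List.slice_to_natCast]
      rfl
    rw [hslice]
    obtain ⟨k, hk⟩ : ∃ k, steps.toNat = k + 1 := ⟨steps.toNat - 1, by omega⟩
    rw [hk, List.range_succ_eq_map, List.foldl_cons, List.foldl_cons, List.foldl_map,
      List.foldl_map]
    have hv0 : ∀ i, i < (x :: y :: z :: rest).length →
        (List.replicate (x :: y :: z :: rest).length
          (List.replicate ((x :: y :: z :: rest).getD 0 []).length (0 : Int))).getD i []
          = List.replicate x.length 0 :=
      fun i hi => pv_getD_replicate _ _ i hi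
    have hinv1 : pvInv
        (pvA_move3d (x :: y :: z :: rest)
          (List.replicate (x :: y :: z :: rest).length
            (List.replicate ((x :: y :: z :: rest).getD 0 []).length (0 : Int))))
        (([x, y, z].map (fun axis => (axis, List.replicate axis.length (0 : Int)))).map
          (fun ab => pvB_stepAxis ab.1 ab.2)) := by
      have h0 := hv0 0 (by simp)
      have h1 := hv0 1 (by simp)
      have h2 := hv0 2 (by simp)
      have hx : pvA_move x (List.replicate x.length (0 : Int)) = pvB_stepAxis x (List.replicate x.length 0) :=
        pv_step_eq _ _ (by simp)
      have hyy : pvA_move y (List.replicate x.length (0 : Int)) = pvB_stepAxis y (List.replicate y.length 0) := by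
        rw [hy]; exact pv_step_eq _ _ (by simp [hy])
      have hzz : pvA_move z (List.replicate x.length (0 : Int)) = pvB_stepAxis z (List.replicate z.length 0) := by
        rw [hz']; exact pv_step_eq _ _ (by simp [hz'])
      refine ⟨?_, ?_, by simp, ?_⟩
      · simp only [pvA_move3d, List.map_map, List.map_cons, List.map_nil]
        simp only [List.getD_cons_zero, List.getD_cons_succ] at *
        simp [h0, h1, h2, hx, hyy, hzz]
      · simp only [pvA_move3d, List.map_map, List.map_cons, List.map_nil]
        simp only [List.getD_cons_zero, List.getD_cons_succ] at *
        simp [h0, h1, h2, hx, hyy, hzz]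
      · intro ab hab
        simp only [List.map_map, List.map_cons, List.map_nil, List.mem_cons] at hab
        rcases hab with h | h | h | h
        · rw [h]; exact ((pv_step_len x _).1.trans (pv_step_len x _).2.symm)
        · rw [h]; exact ((pv_step_len y _).1.trans (pv_step_len y _).2.symm)
        · rw [h]; exact ((pv_step_len z _).1.trans (pv_step_len z _).2.symm)
        · simp at h
    have hinv := pv_fold_inv (List.range k) _ _ hinv1
    obtain ⟨e1, e2, _, _⟩ := hinv
    rw [e1, e2, pv_absCol, pv_absCol]

-- ===== VERDICT (by name: the statement is the Claim_ definition above) =====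
theorem total_energy_spec : Claim_equal_total_energy := by
  intro positions steps _ hpre
  unfold Spec_total_energy
  exact pv_main positions steps hpre
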